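-- pv_equiv track=rewrite | github.com/manlaig/foo_bar | cake_slicing.py | solution
-- ===== SOURCE A (Python) =====
-- def solution(s):
--     n = len(s)
--     for i in range(1, n//2+1, 1 if n % 2 == 0 else 2):
--         slice = s[:i]
--         size = i
--         valid = True
--         if n % size == 0:
--             for j in range(i, n, size):
--                 if s[j : j + size] != slice:
--                     valid = False
--                     break
--             if valid:
--                 return n // size
--     return 0
-- ===== SOURCE B (Python) =====
-- def solution(s):
--     n = len(s)
--     p = (s + s).find(s, 1)
--     if 0 < p < n:
--         return n // p
--     return 0
-- ===== Notes on version B (the rewrite author's own statement) =====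
-- stated objective: faster
-- what changed: B drops A's divisor enumeration with chunk-by-chunk prefix comparison and uses the rotation trick: the first index p >= 1 at which s occurs in s + s is the smallest rotation fixpoint, it necessarily divides len(s), and s is a repetition iff p < len(s), so B returns n // p from a single substring search.
import Mathlib
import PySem

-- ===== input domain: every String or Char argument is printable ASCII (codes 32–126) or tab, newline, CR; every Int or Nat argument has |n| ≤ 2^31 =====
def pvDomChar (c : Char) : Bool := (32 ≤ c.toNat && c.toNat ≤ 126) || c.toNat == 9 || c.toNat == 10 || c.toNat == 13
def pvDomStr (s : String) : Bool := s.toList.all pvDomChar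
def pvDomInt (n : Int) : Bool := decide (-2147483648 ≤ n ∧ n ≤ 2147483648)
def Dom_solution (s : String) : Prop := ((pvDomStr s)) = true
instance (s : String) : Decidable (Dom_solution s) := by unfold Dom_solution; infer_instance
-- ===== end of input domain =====

-- B replaces A's divisor enumeration with chunk-by-chunk prefix comparison by the rotation
-- trick: the first index p >= 1 at which s occurs in s + s is the smallest rotation fixpoint,
-- it necessarily divides len(s), and s is periodic iff p < len(s); B returns n // p.

-- ===== PORT A =====
-- inner loop: 'for j in range(i, n, size): if s[j:j+size] != slice: valid = False; break'
def solutionInner (cs slc : List Char) (size : Int) (js : List Int) : Bool :=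
  match js with
  | [] => true
  | j :: rest =>
    if PySem.List.slice cs (some j) (some (j + size)) ≠ slc then false
    else solutionInner cs slc size rest

-- outer loop: 'for i in range(1, n//2+1, 1 if n % 2 == 0 else 2)' with its early return
def solutionLoop (cs : List Char) (n : Int) (is : List Int) : Int :=
  match is with
  | [] => 0
  | i :: rest =>
    let slc := PySem.List.slice cs none (some i)
    let size := i
    if PySem.Int.mod n size == 0 then
      if solutionInner cs slc size (PySem.List.pyRange i n size) then
        PySem.Int.floordiv n size
      else solutionLoop cs n rest
    else solutionLoop cs n rest

def solution (s : String) : Int :=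
  let cs := s.toList
  let n : Int := (cs.length : Int)
  solutionLoop cs n
    (PySem.List.pyRange 1 (PySem.Int.floordiv n 2 + 1)
      (if PySem.Int.mod n 2 == 0 then 1 else 2))

-- ===== PORT B =====
-- 'p = (s + s).find(s, 1); return n // p if 0 < p < n else 0' (ported on toList, exact)
def solution_alt (s : String) : Int :=
  let cs := s.toList
  let n : Int := (cs.length : Int)
  let p := PySem.Chars.findFrom (cs ++ cs) cs 1
  if 0 < p ∧ p < n then PySem.Int.floordiv n p else 0

-- ===== PRECONDITION & SPEC =====
def Spec_solution (s : String) (out : Int) : Prop := out = solution_alt s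
instance (s : String) (out : Int) : Decidable (Spec_solution s out) := by unfold Spec_solution; infer_instance

-- ===== CLAIM (what is proved, stated in full; the proofs are below) =====
def Claim_equal_solution : Prop := ∀ (s : String), Dom_solution s → Spec_solution s (solution s)

-- ===== LEMMAS AND PROOFS =====

-- proof-only canonical form of A's loop: divisor test + replicated-prefix comparison, step 1
def canonLoop (cs : List Char) (n : Int) (is : List Int) : Int :=
  match is with
  | [] => 0
  | i :: rest =>
    if PySem.Int.mod n i == 0
        && (PySem.List.pyRepeat (PySem.List.slice cs none (some i)) (PySem.Int.floordiv n i) == cs) then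
      PySem.Int.floordiv n i
    else canonLoop cs n rest

-- A's inner loop with its break is the 'every chunk equals the slice' check
theorem solutionInner_eq_all (cs slc : List Char) (size : Int) (js : List Int) :
    solutionInner cs slc size js
      = js.all (fun j => PySem.List.slice cs (some j) (some (j + size)) == slc) := by
  induction js with
  | nil => rfl
  | cons j rest ih =>
    simp only [solutionInner, List.all_cons]
    by_cases h : PySem.List.slice cs (some j) (some (j + size)) = slc
    · simp [h, ih]
    · simp [h]

-- dropping k blocks from a flattened replicate
theorem drop_flatten_replicate {α : Type} (t : List α) (i : Nat) (ht : t.length = i) :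
    ∀ (k m : Nat), k ≤ m →
      (List.replicate m t).flatten.drop (k * i) = (List.replicate (m - k) t).flatten := by
  intro k
  induction k with
  | zero => intro m _; simp
  | succ k ih =>
    intro m hkm
    obtain ⟨m', rfl⟩ : ∃ m', m = m' + 1 := ⟨m - 1, by omega⟩
    have h1 : (k + 1) * i = t.length + k * i := by rw [ht, Nat.succ_mul, Nat.add_comm]
    rw [List.replicate_succ, List.flatten_cons, h1]
    simp only [List.drop_append]
    simp
    rw [ih m' (by omega)]
    simp [List.drop_eq_nil_of_le]

-- all chunks equal → the list is the flattened replicate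
theorem repl_of_chunks {α : Type} (i : Nat) (t : List α) (_ht : t.length = i) :
    ∀ (m : Nat) (cs : List α), cs.length = m * i →
      (∀ k, k < m → (cs.drop (k * i)).take i = t) →
      cs = (List.replicate m t).flatten := by
  intro m
  induction m with
  | zero => intro cs h _; simpa using h
  | succ m ih =>
    intro cs hlen hch
    have h0 : cs.take i = t := by simpa using hch 0 (by omega)
    have hdi : (cs.drop i).length = m * i := by simp [hlen, Nat.succ_mul]
    have hrest : cs.drop i = (List.replicate m t).flatten := by
      apply ih _ hdi
      intro k hk
      rw [List.drop_drop]
      have h2 : i + k * i = (k + 1) * i := by rw [Nat.succ_mul, Nat.add_comm]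
      rw [h2]
      exact hch (k + 1) (by omega)
    calc cs = cs.take i ++ cs.drop i := (List.take_append_drop i cs).symm
      _ = t ++ (List.replicate m t).flatten := by rw [h0, hrest]
      _ = (List.replicate (m + 1) t).flatten := by rw [List.replicate_succ, List.flatten_cons]

-- the chunk property ↔ the replicate equality
theorem chunks_iff_repl (cs : List Char) (i : Nat) (hi : 0 < i) (hin : i ≤ cs.length)
    (hdvd : i ∣ cs.length) :
    ((∀ k : Nat, 1 ≤ k → k * i < cs.length → (cs.drop (k * i)).take i = cs.take i)
      ↔ (List.replicate (cs.length / i) (cs.take i)).flatten = cs) := by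
  have ht : (cs.take i).length = i := by simp [hin]
  have hm : cs.length = (cs.length / i) * i := (Nat.div_mul_cancel hdvd).symm
  constructor
  · intro hch
    refine (repl_of_chunks i _ ht _ cs hm ?_).symm
    intro k hk
    rcases Nat.eq_zero_or_pos k with rfl | hk1
    · simp
    · exact hch k hk1 (lt_of_lt_of_le ((Nat.mul_lt_mul_right hi).2 hk) (le_of_eq hm.symm))
  · intro h k hk1 hk2
    have hkm : k < cs.length / i := by
      by_contra hc
      push Not at hc
      have : (cs.length / i) * i ≤ k * i := Nat.mul_le_mul_right i hc
      omega
    conv_lhs => rw [← h]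
    rw [drop_flatten_replicate _ i ht k _ (le_of_lt hkm)]
    rw [show cs.length / i - k = (cs.length / i - k - 1) + 1 by omega,
        List.replicate_succ, List.flatten_cons]
    exact List.take_left' ht

-- A's inner check over range(i, n, i) equals the replicated-prefix comparison
theorem inner_eq_repl (cs : List Char) (k : Nat) (hk1 : 1 ≤ k) (hk2 : 2 * k ≤ cs.length)
    (hdvd : k ∣ cs.length) :
    solutionInner cs (cs.take k) (k : Int) (PySem.List.pyRange (k : Int) (cs.length : Int) (k : Int))
      = ((List.replicate (cs.length / k) (cs.take k)).flatten == cs) := by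
  rw [solutionInner_eq_all]
  apply Bool.eq_iff_iff.2
  rw [List.all_eq_true, beq_iff_eq]
  rw [← chunks_iff_repl cs k hk1 (by omega) hdvd]
  constructor
  · intro hall c hc1 hclt
    have hmem : ((c * k : Nat) : Int) ∈ PySem.List.pyRange (k : Int) (cs.length : Int) (k : Int) := by
      rw [PySem.List.mem_pyRange_iff_of_pos (by exact_mod_cast hk1)]
      refine ⟨by exact_mod_cast Nat.le_mul_of_pos_left k hc1, by exact_mod_cast hclt, ?_⟩
      exact ⟨(c : Int) - 1, by push_cast; ring⟩
    have := hall _ hmem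
    rw [beq_iff_eq] at this
    rw [PySem.List.slice_natCast_add] at this
    exact this
  · intro hch j hj
    rw [PySem.List.mem_pyRange_iff_of_pos (by exact_mod_cast hk1)] at hj
    obtain ⟨hj1, hj2, hj3⟩ := hj
    have hj0 : 0 ≤ j := le_trans (by exact_mod_cast Nat.zero_le k) hj1
    obtain ⟨q, rfl⟩ : ∃ q : Nat, j = (q : Int) := ⟨j.toNat, (Int.toNat_of_nonneg hj0).symm⟩
    have hq1 : k ≤ q := by exact_mod_cast hj1
    have hq2 : q < cs.length := by exact_mod_cast hj2
    obtain ⟨c, hc⟩ := hj3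
    have hqc : q = (c.toNat + 1) * k := by
      have hc0 : 0 ≤ c := by
        by_contra hneg
        push Not at hneg
        nlinarith [hc, Int.natCast_nonneg q, Int.natCast_nonneg k]
      have hcast : ((c.toNat : Int)) = c := Int.toNat_of_nonneg hc0
      have h2 : (q : Int) = ((c.toNat : Int) + 1) * (k : Int) := by
        rw [hcast]; linear_combination hc
      exact_mod_cast h2
    rw [beq_iff_eq, PySem.List.slice_natCast_add]
    rw [hqc]
    exact hch (c.toNat + 1) (by omega) (by omega)

-- over any list of candidates 1 ≤ k ≤ n/2, A's loop agrees with the canonical loop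
theorem loop_eq (cs : List Char) (is : List Int)
    (h : ∀ i ∈ is, ∃ k : Nat, 1 ≤ k ∧ 2 * k ≤ cs.length ∧ i = (k : Int)) :
    solutionLoop cs (cs.length : Int) is = canonLoop cs (cs.length : Int) is := by
  induction is with
  | nil => rfl
  | cons i rest ih =>
    obtain ⟨k, hk1, hk2, rfl⟩ := h _ (List.mem_cons_self)
    have hrest := ih (fun j hj => h j (List.mem_cons_of_mem _ hj))
    simp only [solutionLoop, canonLoop, PySem.Int.mod_natCast,
      PySem.Int.floordiv_natCast, PySem.List.slice_to_natCast]
    by_cases hmod : cs.length % k = 0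
    · have hdvd : k ∣ cs.length := Nat.dvd_of_mod_eq_zero hmod
      rw [hmod]
      simp only [Nat.cast_zero, BEq.rfl, Bool.true_and, if_true]
      rw [inner_eq_repl cs k hk1 hk2 hdvd]
      simp only [PySem.List.pyRepeat, Int.toNat_natCast]
      by_cases hrep : (List.replicate (cs.length / k) (cs.take k)).flatten = cs
      · simp [hrep]
      · simp [hrep, hrest]
    · have hnd : ¬ ((k : Int) ∣ (cs.length : Int)) := by
        rw [Int.natCast_dvd_natCast]
        intro hd
        exact hmod (Nat.dvd_iff_mod_eq_zero.mp hd)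
      simp [hnd, hrest]

-- the canonical loop skips every candidate that does not divide n
theorem canonLoop_filter (cs : List Char) (n : Int) (is : List Int) :
    canonLoop cs n is
      = canonLoop cs n (is.filter (fun i => PySem.Int.mod n i == 0)) := by
  induction is with
  | nil => rfl
  | cons i rest ih =>
    by_cases h : PySem.Int.mod n i = 0
    · simp only [canonLoop, List.filter_cons, h]
      simp only [BEq.rfl, if_true, Bool.true_and]
      by_cases h2 : PySem.List.pyRepeat (PySem.List.slice cs none (some i)) (PySem.Int.floordiv n i) = cs
      · simp [canonLoop, h2, h]
      · simp only [canonLoop]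
        have hb : (PySem.Int.mod n i == 0) = true := by simp [h]
        simp [hb, h2, ih]
    · have hb : (PySem.Int.mod n i == 0) = false := by simp [h]
      simp only [canonLoop, List.filter_cons, hb]
      simp [ih]

-- a predicate false on the positive evens filters [1..h] and [1,3..h] to the same list
theorem filter_range_even_false (p : Int → Bool)
    (hp : ∀ e : Int, 0 < e → (2 : Int) ∣ e → p e = false) :
    ∀ h : Nat,
      (List.map (fun k : Nat => (1 : Int) + (k : Int)) (List.range h)).filter p
        = (List.map (fun k : Nat => (1 : Int) + 2 * (k : Int)) (List.range ((h + 1) / 2))).filter p := by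
  intro h
  induction h with
  | zero => rfl
  | succ h ih =>
    rw [List.range_succ, List.map_append, List.filter_append]
    rcases Nat.even_or_odd h with he | ho
    · obtain ⟨t, rfl⟩ := he
      have h1 : (t + t + 1 + 1) / 2 = (t + t + 1) / 2 + 1 := by omega
      rw [h1, List.range_succ, List.map_append, List.filter_append, ← ih]
      congr 2
      simp only [List.map_cons, List.map_nil]
      congr 1
      have : (t + t + 1) / 2 = t := by omega
      rw [this]
      push_cast
      ring
    · obtain ⟨t, rfl⟩ := ho
      have h1 : (2 * t + 1 + 1 + 1) / 2 = (2 * t + 1 + 1) / 2 := by omega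
      rw [h1, ← ih]
      have hpf : p (1 + (2 * (t : Int) + 1)) = false := by
        apply hp
        · omega
        · exact ⟨(t : Int) + 1, by ring⟩
      simp [hpf]

-- range(1, M, 1) as a mapped List.range
theorem pyRange_one_natCast' (M : Nat) :
    PySem.List.pyRange 1 (M : Int) 1
      = List.map (fun k : Nat => (1 : Int) + (k : Int)) (List.range (M - 1)) := by
  rw [PySem.List.pyRange_of_pos _ _ (by norm_num : (0:Int) < 1)]
  split_ifs with h
  · have h2 : ((M : Int) - 1).toNat = M - 1 := by omega
    simp [h2]
  · have : M - 1 = 0 := by omega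
    simp [this]

-- A's outer range, step 2, as a mapped List.range
theorem pyRangeHalf_two (N : Nat) :
    PySem.List.pyRange 1 ((N / 2 : Nat) + 1 : Int) 2
      = List.map (fun k : Nat => (1 : Int) + 2 * (k : Int)) (List.range ((N / 2 + 1) / 2)) := by
  rw [PySem.List.pyRange_of_pos _ _ (by norm_num : (0:Int) < 2)]
  split_ifs with h
  · have hc : ((((N / 2 : Nat) : Int) + 1 - 1 + 2 - 1) / 2).toNat = (N / 2 + 1) / 2 := by omega
    rw [hc]
  · have : N / 2 = 0 := by omega
    simp [this]

-- every element of range(1, n//2+1, step) is a Nat k with 1 ≤ k and 2k ≤ n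
theorem mem_half_range (N : Nat) (step : Int) (hs : 0 < step) :
    ∀ i ∈ PySem.List.pyRange 1 ((N / 2 : Nat) + 1 : Int) step,
      ∃ k : Nat, 1 ≤ k ∧ 2 * k ≤ N ∧ i = (k : Int) := by
  intro i hi
  rw [PySem.List.mem_pyRange_iff_of_pos hs] at hi
  obtain ⟨h1, h2, _⟩ := hi
  exact ⟨i.toNat, by omega, by omega, by omega⟩

-- A = canonical loop over range(1, n//2+1, 1) (reused proof of A's stride elimination)
theorem solution_eq_canon (s : String) :
    solution s
      = canonLoop s.toList (s.toList.length : Int)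
          (PySem.List.pyRange 1 ((s.toList.length / 2 : Nat) + 1 : Int) 1) := by
  unfold solution
  show solutionLoop s.toList (s.toList.length : Int)
      (PySem.List.pyRange 1 (PySem.Int.floordiv (s.toList.length : Int) 2 + 1)
        (if PySem.Int.mod (s.toList.length : Int) 2 == 0 then 1 else 2))
    = canonLoop s.toList (s.toList.length : Int)
        (PySem.List.pyRange 1 ((s.toList.length / 2 : Nat) + 1 : Int) 1)
  have hfd : PySem.Int.floordiv (s.toList.length : Int) 2 = ((s.toList.length / 2 : Nat) : Int) := by
    exact_mod_cast PySem.Int.floordiv_natCast s.toList.length 2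
  have hmd : PySem.Int.mod (s.toList.length : Int) 2 = ((s.toList.length % 2 : Nat) : Int) := by
    exact_mod_cast PySem.Int.mod_natCast s.toList.length 2
  rw [hfd, hmd]
  by_cases hpar : s.toList.length % 2 = 0
  · rw [hpar]
    simp only [Nat.cast_zero, BEq.rfl, if_true]
    exact loop_eq _ _ (mem_half_range _ 1 (by norm_num))
  · have hodd : s.toList.length % 2 = 1 := by omega
    rw [hodd]
    have hb : (((1 : Nat) : Int) == 0) = false := by decide
    rw [hb]
    simp only [Bool.false_eq_true, if_false]
    have hp : ∀ e : Int, 0 < e → (2 : Int) ∣ e →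
        ((fun i => PySem.Int.mod (s.toList.length : Int) i == 0) e) = false := by
      intro e he h2e
      simp only [beq_eq_false_iff_ne, ne_eq]
      intro hm
      rw [PySem.Int.mod_eq_zero_iff_dvd] at hm
      have h2n : (2 : Int) ∣ (s.toList.length : Int) := dvd_trans h2e hm
      omega
    have hhalf : PySem.List.pyRange 1 ((s.toList.length / 2 : Nat) + 1 : Int) 1
        = List.map (fun k : Nat => (1 : Int) + (k : Int)) (List.range (s.toList.length / 2)) := by
      have := pyRange_one_natCast' (s.toList.length / 2 + 1)
      push_cast at this ⊢
      simpa using this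
    calc solutionLoop s.toList (s.toList.length : Int)
            (PySem.List.pyRange 1 ((s.toList.length / 2 : Nat) + 1 : Int) 2)
        = canonLoop s.toList (s.toList.length : Int)
            (PySem.List.pyRange 1 ((s.toList.length / 2 : Nat) + 1 : Int) 2) :=
          loop_eq _ _ (mem_half_range _ 2 (by norm_num))
      _ = canonLoop s.toList (s.toList.length : Int)
            ((PySem.List.pyRange 1 ((s.toList.length / 2 : Nat) + 1 : Int) 2).filter
              (fun i => PySem.Int.mod (s.toList.length : Int) i == 0)) := canonLoop_filter _ _ _
      _ = canonLoop s.toList (s.toList.length : Int)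
            ((PySem.List.pyRange 1 ((s.toList.length / 2 : Nat) + 1 : Int) 1).filter
              (fun i => PySem.Int.mod (s.toList.length : Int) i == 0)) := by
          rw [hhalf, pyRangeHalf_two, ← filter_range_even_false _ hp]
      _ = canonLoop s.toList (s.toList.length : Int)
            (PySem.List.pyRange 1 ((s.toList.length / 2 : Nat) + 1 : Int) 1) :=
          (canonLoop_filter _ _ _).symm

-- ---- the rotation-fixpoint argument ----

-- Nat-level predicates and first-hit scan
def rotP (cs : List Char) (k : Nat) : Bool := (cs.drop k ++ cs.take k == cs)

def canonP (cs : List Char) (k : Nat) : Bool :=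
  (cs.length % k == 0) && ((List.replicate (cs.length / k) (cs.take k)).flatten == cs)

def firstHit (p : Nat → Bool) (g : Nat → Int) : List Nat → Int
  | [] => 0
  | k :: r => if p k then g k else firstHit p g r

theorem firstHit_all_false (p : Nat → Bool) (g : Nat → Int) (l : List Nat)
    (h : ∀ k ∈ l, p k = false) : firstHit p g l = 0 := by
  induction l with
  | nil => rfl
  | cons k r ih =>
    simp only [firstHit, h k List.mem_cons_self]
    exact ih (fun j hj => h j (List.mem_cons_of_mem _ hj))

theorem firstHit_append_false (p : Nat → Bool) (g : Nat → Int) (l1 l2 : List Nat)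
    (h : ∀ k ∈ l1, p k = false) : firstHit p g (l1 ++ l2) = firstHit p g l2 := by
  induction l1 with
  | nil => rfl
  | cons k r ih =>
    simp only [List.cons_append, firstHit, h k List.mem_cons_self]
    exact ih (fun j hj => h j (List.mem_cons_of_mem _ hj))

-- first hit over [1..L]: p0 is the first satisfier
theorem firstHit_range (p : Nat → Bool) (g : Nat → Int) (L p0 : Nat)
    (h1 : 1 ≤ p0) (h2 : p0 ≤ L) (hp : p p0 = true)
    (hmin : ∀ k, 0 < k → k < p0 → p k = false) :
    firstHit p g ((List.range L).map (· + 1)) = g p0 := by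
  have hsplit : List.range L = List.range' 0 (p0 - 1) ++ List.range' (p0 - 1) (L - (p0 - 1)) := by
    have h : List.range' 0 (p0 - 1) 1 ++ List.range' (0 + 1 * (p0 - 1)) (L - (p0 - 1)) 1
        = List.range' 0 ((p0 - 1) + (L - (p0 - 1))) 1 := List.range'_append
    simp only [Nat.zero_add, Nat.one_mul] at h
    rw [show p0 - 1 + (L - (p0 - 1)) = L by omega] at h
    rw [List.range_eq_range', ← h]
  rw [hsplit, List.map_append, firstHit_append_false]
  · rw [show L - (p0 - 1) = (L - p0) + 1 by omega, List.range'_succ]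
    simp only [List.map_cons, firstHit]
    rw [show p0 - 1 + 1 = p0 by omega, hp]
    simp
  · intro k hk
    simp only [List.mem_map] at hk
    obtain ⟨j, hj, rfl⟩ := hk
    rw [List.mem_range'] at hj
    exact hmin (j + 1) (by omega) (by omega)

-- rotP in terms of List.rotate
theorem rotP_eq_rotate (cs : List Char) (k : Nat) (hk : k ≤ cs.length) :
    rotP cs k = true ↔ cs.rotate k = cs := by
  rw [List.rotate_eq_drop_append_take hk]
  simp [rotP]

-- the minimal positive rotation fixpoint divides the length
theorem min_rot_dvd (cs : List Char) (p0 : Nat) (h1 : 0 < p0) (h2 : p0 < cs.length)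
    (hp : rotP cs p0 = true) (hmin : ∀ k, 0 < k → k < p0 → rotP cs k = false) :
    p0 ∣ cs.length := by
  have hfix : cs.rotate p0 = cs := (rotP_eq_rotate cs p0 (le_of_lt h2)).1 hp
  have hmul : ∀ m : Nat, cs.rotate (m * p0) = cs := by
    intro m
    induction m with
    | zero => simp
    | succ m ih =>
      rw [Nat.succ_mul, ← List.rotate_rotate, ih, hfix]
  set r := cs.length % p0 with hr
  have hfr : cs.rotate r = cs := by
    have heq : cs.length / p0 * p0 + r = cs.length := by
      rw [Nat.mul_comm]; exact Nat.div_add_mod cs.length p0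
    -- rotate r cs = rotate r (rotate (q*p0) cs) = rotate (q*p0 + r) cs = rotate n cs = cs
    calc cs.rotate r = (cs.rotate (cs.length / p0 * p0)).rotate r := by rw [hmul]
      _ = cs.rotate (cs.length / p0 * p0 + r) := List.rotate_rotate cs _ r
      _ = cs.rotate cs.length := by rw [heq]
      _ = cs := List.rotate_length cs
  rcases Nat.eq_zero_or_pos r with h0 | hpos
  · exact Nat.dvd_of_mod_eq_zero h0
  · exfalso
    have hrlt : r < p0 := Nat.mod_lt _ h1
    have : rotP cs r = true := (rotP_eq_rotate cs r (by omega)).2 hfr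
    rw [hmin r hpos hrlt] at this
    exact Bool.false_ne_true this

-- canonP implies rotP (a full repetition is rotation-invariant)
theorem rotP_of_canonP (cs : List Char) (k : Nat) (h1 : 0 < k) (h2 : 2 * k ≤ cs.length)
    (hc : canonP cs k = true) : rotP cs k = true := by
  simp only [canonP, Bool.and_eq_true, beq_iff_eq] at hc
  obtain ⟨hmod, hrep⟩ := hc
  have hdvd : k ∣ cs.length := Nat.dvd_of_mod_eq_zero hmod
  set m := cs.length / k with hm
  have hm1 : 1 ≤ m := by
    have : k * m = cs.length := Nat.mul_div_cancel' hdvd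
    by_contra hc'
    push Not at hc'
    interval_cases m
    all_goals omega
  have ht : (cs.take k).length = k := by simp; omega
  have hdropk : cs.drop k = (List.replicate (m - 1) (cs.take k)).flatten := by
    conv_lhs => rw [← hrep]
    have := drop_flatten_replicate (cs.take k) k ht 1 m hm1
    simpa using this
  simp only [rotP, beq_iff_eq]
  rw [hdropk]
  conv_rhs => rw [← hrep]
  rw [show m = (m - 1) + 1 by omega, List.replicate_succ', List.flatten_append]
  simp
-- canonP from rotP plus divisibility
theorem canonP_of_rotP (cs : List Char) (p : Nat) (h1 : 0 < p) (h2 : p < cs.length)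
    (hdvd : p ∣ cs.length) (hr : rotP cs p = true) : canonP cs p = true := by
  simp only [canonP, Bool.and_eq_true, beq_iff_eq]
  refine ⟨Nat.mod_eq_zero_of_dvd hdvd, ?_⟩
  -- chunk property from the rotation equality, then chunks_iff_repl
  simp only [rotP, beq_iff_eq] at hr
  have hdrop : cs.drop p = cs.take (cs.length - p) := by
    have hlen : (cs.drop p).length = cs.length - p := by simp
    calc cs.drop p = (cs.drop p ++ cs.take p).take (cs.length - p) := (List.take_left' hlen).symm
      _ = cs.take (cs.length - p) := by rw [hr]
  have hch : ∀ k : Nat, k * p < cs.length → (cs.drop (k * p)).take p = cs.take p := by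
    intro k
    induction k with
    | zero => simp
    | succ k ih =>
      intro hlt
      have hle : (k + 1) * p + p ≤ cs.length := by
        -- (k+1)p < n and p ∣ n give (k+2)p ≤ n
        obtain ⟨c, hc⟩ := hdvd
        have : k + 1 < c := by nlinarith
        nlinarith
      have hle' : k * p + p + p ≤ cs.length := by nlinarith [hle]
      have : cs.drop ((k + 1) * p) = (cs.drop p).drop (k * p) := by
        rw [List.drop_drop]; congr 1; ring
      rw [this, hdrop]
      rw [List.drop_take]
      rw [List.take_take]
      rw [show min p (cs.length - p - k * p) = p by omega]
      exact ih (by omega)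
  rw [← chunks_iff_repl cs p h1 (by omega) hdvd]
  intro k _ hk2
  exact hch k hk2
-- a positive divisor below the length is at most half the length
theorem dvd_lt_le_half (p n : Nat) (_h1 : 0 < p) (h2 : p < n) (hdvd : p ∣ n) : 2 * p ≤ n := by
  obtain ⟨c, hc⟩ := hdvd
  have : 2 ≤ c := by nlinarith
  nlinarith

-- the heart: canonical divisor scan over [1..n/2] = rotation scan over [1..n-1]
theorem firstHit_canon_eq_rot (cs : List Char) :
    firstHit (canonP cs) (fun k => ((cs.length / k : Nat) : Int)) ((List.range (cs.length / 2)).map (· + 1))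
      = firstHit (rotP cs) (fun k => ((cs.length / k : Nat) : Int)) ((List.range (cs.length - 1)).map (· + 1)) := by
  by_cases hex : ∃ k, 0 < k ∧ k < cs.length ∧ rotP cs k = true
  · obtain ⟨p0, hp0, hmin0⟩ := Nat.lt_wfRel.wf.has_min
      {k | 0 < k ∧ k < cs.length ∧ rotP cs k = true} (by exact hex)
    obtain ⟨hp1, hp2, hp3⟩ := hp0
    have hmin : ∀ k, 0 < k → k < p0 → rotP cs k = false := by
      intro k hk1 hk2
      by_contra hc
      have hkt : rotP cs k = true := by
        cases h : rotP cs k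
        · exact absurd h hc
        · rfl
      exact hmin0 k ⟨hk1, by omega, hkt⟩ hk2
    have hdvd : p0 ∣ cs.length := min_rot_dvd cs p0 hp1 hp2 hp3 hmin
    have hhalf : 2 * p0 ≤ cs.length := dvd_lt_le_half p0 cs.length hp1 hp2 hdvd
    rw [firstHit_range (canonP cs) _ (cs.length / 2) p0 hp1 (by omega)
        (canonP_of_rotP cs p0 hp1 hp2 hdvd hp3)
        (fun k hk1 hk2 => by
          cases h : canonP cs k
          · rfl
          · exfalso
            have := rotP_of_canonP cs k hk1 (by omega) h
            rw [hmin k hk1 hk2] at this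
            exact Bool.false_ne_true this)]
    rw [firstHit_range (rotP cs) _ (cs.length - 1) p0 hp1 (by omega) hp3 hmin]
  · push Not at hex
    rw [firstHit_all_false, firstHit_all_false]
    · intro k hk
      simp only [List.mem_map] at hk
      obtain ⟨j, hj, rfl⟩ := hk
      rw [List.mem_range] at hj
      cases h : rotP cs (j + 1)
      · rfl
      · exfalso; exact absurd h (by simpa using hex (j + 1) (by omega) (by omega))
    · intro k hk
      simp only [List.mem_map] at hk
      obtain ⟨j, hj, rfl⟩ := hk
      rw [List.mem_range] at hj
      cases h : canonP cs (j + 1)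
      · rfl
      · exfalso
        have hk1 : 0 < j + 1 := by omega
        have hk2 : 2 * (j + 1) ≤ cs.length := by omega
        have hrot := rotP_of_canonP cs (j + 1) hk1 hk2 h
        exact absurd hrot (by simpa using hex (j + 1) hk1 (by omega))

-- the canonical loop over Int candidates computes the Nat-level firstHit with canonP
theorem canonLoop_eq_firstHit (cs : List Char) (l : List Nat) :
    canonLoop cs (cs.length : Int) (l.map (fun k : Nat => (k : Int)))
      = firstHit (canonP cs) (fun k => ((cs.length / k : Nat) : Int)) l := by
  induction l with
  | nil => rfl
  | cons k r ih =>
    simp only [List.map_cons, canonLoop, firstHit]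
    rw [PySem.Int.mod_natCast, PySem.Int.floordiv_natCast, PySem.List.slice_to_natCast]
    by_cases hmod : cs.length % k = 0
    · simp only [canonP, hmod, Nat.cast_zero, BEq.rfl, Bool.true_and,
        PySem.List.pyRepeat, Int.toNat_natCast]
      by_cases hrep : (List.replicate (cs.length / k) (cs.take k)).flatten = cs
      · simp [hrep]
      · simp [hrep, ih]
    · have h1 : (((cs.length % k : Nat) : Int) == 0) = false := by
        rw [beq_eq_false_iff_ne]
        exact_mod_cast hmod
      have h2 : canonP cs k = false := by
        simp [canonP, hmod]
      simp only [h1, h2, Bool.false_and, Bool.false_eq_true, if_false]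
      exact ih

-- s is a prefix of (s+s) shifted by p exactly when p is a rotation fixpoint
theorem rot_prefix_iff (cs : List Char) (p : Nat) (h2 : p ≤ cs.length) :
    (cs <+: (cs ++ cs).drop p) ↔ rotP cs p = true := by
  rw [List.drop_append_of_le_length h2, List.prefix_iff_eq_take]
  have e1 : (cs.drop p).take cs.length = cs.drop p :=
    List.take_of_length_le (by simp)
  have e2 : cs.length - (cs.drop p).length = p := by simp; omega
  rw [List.take_append, e1, e2]
  simp only [rotP, beq_iff_eq]
  exact eq_comm

-- B's find on s + s computes the Nat-level firstHit with rotP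
theorem alt_eq_firstHit (s : String) :
    solution_alt s
      = firstHit (rotP s.toList) (fun k => ((s.toList.length / k : Nat) : Int))
          ((List.range (s.toList.length - 1)).map (· + 1)) := by
  rcases Nat.eq_zero_or_pos s.toList.length with h0 | hpos
  · have hcs : s.toList = [] := List.eq_nil_of_length_eq_zero h0
    unfold solution_alt
    rw [hcs]
    decide
  · have hk : 1 ≤ (s.toList ++ s.toList).length := by rw [List.length_append]; omega
    have hinf : s.toList <:+: (s.toList ++ s.toList).drop 1 := by
      apply List.IsSuffix.isInfix
      rw [List.drop_append_of_le_length (show 1 ≤ s.toList.length by omega)]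
      exact List.suffix_append _ _
    have hne : PySem.Chars.findFrom (s.toList ++ s.toList) s.toList ((1 : Nat) : Int) ≠ -1 :=
      fun heq =>
        ((PySem.Chars.findFrom_natCast_eq_neg_one_iff (s.toList ++ s.toList) s.toList 1 hk).1
          heq) hinf
    obtain ⟨hge, hpre, hmin⟩ :=
      PySem.Chars.findFrom_natCast_spec (s.toList ++ s.toList) s.toList 1 hk hne
    simp only [Nat.cast_one] at hge hpre hmin
    set r := PySem.Chars.findFrom (s.toList ++ s.toList) s.toList (1 : Int) with hrdef
    have hr0 : (0 : Int) ≤ r := le_trans (by norm_num) hge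
    have hr1 : 1 ≤ r.toNat := by omega
    have hrn : r.toNat ≤ s.toList.length := by
      by_contra hgt
      push Not at hgt
      have hpn : s.toList <+: (s.toList ++ s.toList).drop s.toList.length := by
        rw [List.drop_left]
      exact hmin s.toList.length (by omega) (by omega) hpn
    have hgoal : solution_alt s
        = (if 0 < r ∧ r < ((s.toList.length : Nat) : Int) then
            PySem.Int.floordiv ((s.toList.length : Nat) : Int) r else 0) := by
      rw [hrdef]
      rfl
    rw [hgoal]
    by_cases hlt : r.toNat < s.toList.length
    · rw [if_pos ⟨by omega, by omega⟩]
      rw [firstHit_range (rotP s.toList) _ (s.toList.length - 1) r.toNat hr1 (by omega)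
          ((rot_prefix_iff s.toList r.toNat (by omega)).1 hpre)
          (fun k hk1 hk2 => by
            cases h : rotP s.toList k
            · rfl
            · exact absurd ((rot_prefix_iff s.toList k (by omega)).2 h)
                (hmin k (by omega) (by omega)))]
      rw [show r = ((r.toNat : Nat) : Int) from (Int.toNat_of_nonneg hr0).symm]
      exact PySem.Int.floordiv_natCast _ _
    · rw [if_neg (by omega)]
      rw [firstHit_all_false]
      intro k hkmem
      simp only [List.mem_map] at hkmem
      obtain ⟨j, hj, rfl⟩ := hkmem
      rw [List.mem_range] at hj
      cases h : rotP s.toList (j + 1)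
      · rfl
      · exact absurd ((rot_prefix_iff s.toList (j + 1) (by omega)).2 h)
          (hmin (j + 1) (by omega) (by omega))

-- ===== VERDICT (by name: the statement is the Claim_ definition above) =====
theorem solution_spec : Claim_equal_solution := by
  intro s _
  unfold Spec_solution
  rw [solution_eq_canon, alt_eq_firstHit]
  have hmap : ∀ (L : Nat), List.map (fun k : Nat => (1 : Int) + (k : Int)) (List.range L)
      = ((List.range L).map (· + 1)).map (fun k : Nat => (k : Int)) := by
    intro L
    rw [List.map_map]
    apply List.map_congr_left
    intro j _
    simp only [Function.comp_apply]
    push_cast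
    ring
  have hA : PySem.List.pyRange 1 ((s.toList.length / 2 : Nat) + 1 : Int) 1
      = ((List.range (s.toList.length / 2)).map (· + 1)).map (fun k : Nat => (k : Int)) := by
    have h0 : ((s.toList.length / 2 : Nat) : Int) + 1
        = ((s.toList.length / 2 + 1 : Nat) : Int) := by push_cast; ring
    rw [h0, pyRange_one_natCast', Nat.add_sub_cancel]
    exact hmap _
  rw [hA, canonLoop_eq_firstHit]
  exact firstHit_canon_eq_rot s.toList
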